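-- pv_equiv track=rewrite | github.com/caboooom/Algorithm | 프로그래머스/lv1/12930. 이상한 문자 만들기/이상한 문자 만들기.py | solution
-- ===== SOURCE A (Python) =====
-- def solution(s):
--     answer = ''
--     # 각 단어의 짝수번째 알파벳은 대문자, 홀수번째 알파벳은 소문자
--
--     temp = s.split()
--
--     blank = [0]*(len(temp)+1)
--     idx=0
--     for i in s:
--         if i == ' ':
--             blank[idx] += 1
--         else:
--             if blank[idx] > 0:
--                 idx += 1
--
--     idx=0
--     if s[0] == ' ':
--         answer += ' '*blank[idx]
--         idx += 1
--
--     for word in temp: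
--         for i in range(len(word)):
--             if i%2==0:
--                 answer += word[i].upper()
--             else:
--                 answer += word[i].lower()
--
--         answer += ' '*blank[idx]
--         idx += 1
--
--     return answer
-- ===== SOURCE B (Python) =====
-- def solution(s):
--     out = []
--     idx = 0
--     for ch in s:
--         if ch == ' ':
--             out.append(ch)
--             idx = 0
--         else:
--             out.append(ch.upper() if idx % 2 == 0 else ch.lower())
--             idx += 1
--     return ''.join(out)
-- ===== Notes on version B (the rewrite author's own statement) =====
-- stated objective: simpler
-- what changed: Replaces A's three passes (str.split, a blank-run counting array with an index walk, then a word-by-word rebuild) by one linear scan that keeps only a within-word position counter reset at each space.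
-- outside the precondition, e.g. on solution('a\tb'): A returns 'AB', B returns 'A\tB'; on solution(' \t '): A raises IndexError, B returns ' \t '; on solution(''): A raises IndexError, B returns ''
import Mathlib
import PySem

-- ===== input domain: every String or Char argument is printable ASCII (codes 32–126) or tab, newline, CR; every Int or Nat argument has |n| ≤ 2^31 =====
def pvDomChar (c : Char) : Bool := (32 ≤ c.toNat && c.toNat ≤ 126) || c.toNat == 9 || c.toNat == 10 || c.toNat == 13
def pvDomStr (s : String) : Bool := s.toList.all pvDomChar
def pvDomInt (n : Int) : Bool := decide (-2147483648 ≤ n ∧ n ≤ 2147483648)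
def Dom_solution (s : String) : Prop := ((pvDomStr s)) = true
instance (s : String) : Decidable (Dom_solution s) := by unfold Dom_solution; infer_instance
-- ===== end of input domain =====

-- B replaces A's three passes (split, blank-run counting array, word rebuild) by one
-- linear scan keeping only a within-word position counter reset at spaces (objective: simpler).

-- ===== PORT A =====
-- the inner `for i in range(len(word))` loop of A (word[i] is always in range there)
def pvAltWord (w : List Char) : List Char :=
  (PySem.List.pyRange 0 (w.length) 1).foldl
    (fun acc i =>
      if PySem.Int.mod i 2 == 0 then acc ++ [PySem.Chars.upperChar ((PySem.List.pyGet? w i).getD ' ')]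
      else acc ++ [PySem.Chars.lowerChar ((PySem.List.pyGet? w i).getD ' ')]) []

-- `answer` is built as a List Char and packed once at the end; Python's non-negative `idx`
-- counters are tracked as Nat. `s[0]` on the empty string raises in Python (outside Pre_);
-- the headD-guard only makes the port total there.
def solution (s : String) : String :=
  let cs := s.toList
  let temp := PySem.Chars.split₀ cs
  let p1 := cs.foldl (fun (st : List Int × Nat) i =>
      if i = ' ' then (st.1.set st.2 (st.1.getD st.2 0 + 1), st.2)
      else if 0 < st.1.getD st.2 0 then (st.1, st.2 + 1) else (st.1, st.2))
    (List.replicate (temp.length + 1) 0, 0)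
  let blank := p1.1
  let st0 : List Char × Nat :=
    if cs.headD 'x' = ' ' then (List.replicate (blank.getD 0 0).toNat ' ', 1) else ([], 0)
  let p2 := temp.foldl (fun (st : List Char × Nat) word =>
      (st.1 ++ pvAltWord word ++ List.replicate (blank.getD st.2 0).toNat ' ', st.2 + 1)) st0
  String.ofList p2.1

-- ===== PORT B =====
def solution_alt (s : String) : String :=
  let st := s.toList.foldl (fun (st : List Char × Int) ch =>
      if ch = ' ' then (st.1 ++ [ch], 0)
      else (st.1 ++ [if PySem.Int.mod st.2 2 == 0 then PySem.Chars.upperChar ch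
                     else PySem.Chars.lowerChar ch], st.2 + 1)) ([], 0)
  String.ofList st.1

-- ===== PRECONDITION & SPEC =====
-- Pre_ excludes the empty string (A's s[0] raises IndexError) and strings containing
-- tab/newline/CR: on those A either raises IndexError (its blank array, sized by
-- str.split() which splits on ALL whitespace, is overrun by its space-run counter, which counts plain spaces only)
-- or silently deletes those whitespace characters — an artefact of counting plain spaces only.
def Pre_solution (s : String) : Prop :=
  s ≠ "" ∧ s.toList.all (fun c => !(c == '\t' || c == '\n' || c == '\r')) = true
instance (s : String) : Decidable (Pre_solution s) := by unfold Pre_solution; infer_instance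

def pvWitness_solution : String := "a b"

def Spec_solution (s : String) (out : String) : Prop := out = solution_alt s
instance (s : String) (out : String) : Decidable (Spec_solution s out) := by
  unfold Spec_solution; infer_instance

-- ===== CLAIM (what is proved, stated in full; the proofs are below) =====
def Claim_equal_solution : Prop :=
  ∀ (s : String), Dom_solution s → Pre_solution s → Spec_solution s (solution s)

-- ===== LEMMAS AND PROOFS =====

-- the common normal form: one pass with a within-word counter
def canon : List Char → Int → List Char
  | [], _ => []
  | c :: t, k =>
    if c = ' ' then ' ' :: canon t 0
    else (if PySem.Int.mod k 2 == 0 then PySem.Chars.upperChar c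
          else PySem.Chars.lowerChar c) :: canon t (k + 1)

def rep (k : Nat) : List Char := List.replicate k ' '

-- run decomposition of the input: each word together with its trailing spaces
def flat (rs : List (List Char × Nat)) : List Char :=
  rs.flatMap (fun p => p.1 ++ rep p.2)

def good : List (List Char × Nat) → Prop
  | [] => True
  | (w, k) :: rest =>
      w ≠ [] ∧ (∀ c ∈ w, PySem.Chars.isspace c = false) ∧ (rest = [] ∨ 1 ≤ k) ∧ good rest

def ok (cs : List Char) : Prop := ∀ c ∈ cs, (PySem.Chars.isspace c = true ↔ c = ' ')

-- A's blank-counting loop body, named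
def pvF (st : List Int × Nat) (i : Char) : List Int × Nat :=
  if i = ' ' then (st.1.set st.2 (st.1.getD st.2 0 + 1), st.2)
  else if 0 < st.1.getD st.2 0 then (st.1, st.2 + 1) else (st.1, st.2)

-- A's phase-2 word loop, as a recursion over the word list reading the final blank array
def renderF (b : List Int) : List (List Char) → Nat → List Char
  | [], _ => []
  | w :: ws, i => pvAltWord w ++ List.replicate ((b.getD i 0).toNat) ' ' ++ renderF b ws (i + 1)

-- A's whole pipeline on the character list (definitionally the body of `solution`)
def coreA (cs : List Char) : List Char :=
  ((PySem.Chars.split₀ cs).foldl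
    (fun (st : List Char × Nat) word =>
      (st.1 ++ pvAltWord word ++
        List.replicate (((cs.foldl pvF
            (List.replicate ((PySem.Chars.split₀ cs).length + 1) 0, 0)).1.getD st.2 0)).toNat ' ',
       st.2 + 1))
    (if cs.headD 'x' = ' '
     then (List.replicate (((cs.foldl pvF
            (List.replicate ((PySem.Chars.split₀ cs).length + 1) 0, 0)).1.getD 0 0)).toNat ' ', 1)
     else ([], 0))).1

theorem solution_eq_coreA (s : String) : solution s = String.ofList (coreA s.toList) := rfl

theorem ne_space_of_isspace_false {c : Char} (h : PySem.Chars.isspace c = false) : c ≠ ' ' := by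
  intro hc; subst hc; revert h; decide

-- ---------- B side ----------
theorem foldB_eq (cs : List Char) : ∀ (acc : List Char) (k : Int),
    (cs.foldl (fun (st : List Char × Int) ch =>
      if ch = ' ' then (st.1 ++ [ch], 0)
      else (st.1 ++ [if PySem.Int.mod st.2 2 == 0 then PySem.Chars.upperChar ch
                     else PySem.Chars.lowerChar ch], st.2 + 1)) (acc, k)).1
    = acc ++ canon cs k := by
  induction cs with
  | nil => intro acc k; simp [canon]
  | cons c t ih =>
    intro acc k
    by_cases hc : c = ' '
    · simp only [List.foldl_cons, hc]
      rw [ih]; simp [canon]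
    · simp only [List.foldl_cons, if_neg hc]
      rw [ih]; simp [canon, hc]

theorem alt_eq_canon (s : String) : solution_alt s = String.ofList (canon s.toList 0) := by
  show String.ofList (s.toList.foldl _ (([] : List Char), (0:Int))).1 = _
  rw [foldB_eq]
  simp

-- ---------- canon structure ----------
theorem canon_rep0 : ∀ (k : Nat) (t : List Char), canon (rep k ++ t) 0 = rep k ++ canon t 0 := by
  intro k
  induction k with
  | zero => intro t; simp [rep]
  | succ n ih => intro t; simpa [rep, List.replicate_succ, canon] using ih t

theorem canon_rep_pos (k : Nat) (hk : 1 ≤ k) (t : List Char) (j : Int) :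
    canon (rep k ++ t) j = rep k ++ canon t 0 := by
  obtain ⟨n, rfl⟩ : ∃ n, k = n + 1 := ⟨k - 1, by omega⟩
  have hr : rep (n+1) ++ t = ' ' :: (rep n ++ t) := by simp [rep, List.replicate_succ]
  rw [hr, show canon (' ' :: (rep n ++ t)) j = ' ' :: canon (rep n ++ t) 0 from by
    simp [canon], canon_rep0]
  simp [rep, List.replicate_succ]

theorem canon_rep_nil (k : Nat) (j : Int) : canon (rep k) j = rep k := by
  cases k with
  | zero => simp [rep, canon]
  | succ n => simpa [canon] using canon_rep_pos (n+1) (by omega) [] j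

theorem canon_word : ∀ (u : List Char), (∀ c ∈ u, c ≠ ' ') → ∀ (v : List Char) (j : Int),
    canon (u ++ v) j = canon u j ++ canon v (j + u.length) := by
  intro u
  induction u with
  | nil => intro _ v j; simp [canon]
  | cons c t ih =>
    intro h v j
    have hc : c ≠ ' ' := h c (by simp)
    have ht : ∀ c ∈ t, c ≠ ' ' := fun x hx => h x (by simp [hx])
    have harg : j + ((c :: t).length : Int) = j + 1 + (t.length : Int) := by
      push_cast [List.length_cons]; ring
    simp only [List.cons_append, canon, if_neg hc, ih ht, harg, List.cons_append]

theorem canon_flat : ∀ rs, good rs →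
    canon (flat rs) 0 = rs.flatMap (fun p => canon p.1 0 ++ rep p.2) := by
  intro rs
  induction rs with
  | nil => intro _; simp [flat, canon]
  | cons p rest ih =>
    obtain ⟨w, k⟩ := p
    intro hg
    obtain ⟨hw, hns, hrk, hrest⟩ := hg
    have hw' : ∀ c ∈ w, c ≠ ' ' := fun c hc => ne_space_of_isspace_false (hns c hc)
    have hsplit : flat ((w, k) :: rest) = w ++ (rep k ++ flat rest) := by simp [flat]
    rw [hsplit, canon_word w hw']
    rcases hrk with h0 | h1
    · subst h0
      simp only [flat, List.flatMap_nil, List.append_nil, List.flatMap_cons]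
      rw [canon_rep_nil]
    · rw [canon_rep_pos k h1 (flat rest) _, ih hrest]
      simp

-- ---------- A's inner word loop = canon on the word ----------
theorem pyRange_zero_eq (n : Nat) :
    PySem.List.pyRange 0 (n : Int) 1 = (List.range n).map (fun k : Nat => (k : Int)) := by
  unfold PySem.List.pyRange
  rcases Nat.eq_zero_or_pos n with h | h
  · subst h; simp
  · have h0 : (0:Int) < (n:Int) := by exact_mod_cast h
    simp only [if_neg (by norm_num : ¬ (1:Int) = 0), if_pos (by norm_num : (0:Int) < 1), if_pos h0]
    have : (((n:Int) - 0 + 1 - 1) / 1).toNat = n := by omega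
    rw [this]
    exact List.map_congr_left (fun k _ => by omega)

theorem pvAltWord_take (w : List Char) (hw : ∀ c ∈ w, c ≠ ' ') :
    ∀ n, n ≤ w.length →
    ((List.range n).map (fun k : Nat => (k : Int))).foldl
      (fun acc i =>
        if PySem.Int.mod i 2 == 0 then acc ++ [PySem.Chars.upperChar ((PySem.List.pyGet? w i).getD ' ')]
        else acc ++ [PySem.Chars.lowerChar ((PySem.List.pyGet? w i).getD ' ')]) []
      = canon (w.take n) 0 := by
  intro n
  induction n with
  | zero => intro _; simp [canon]
  | succ m ih =>
    intro hm
    have hm' : m ≤ w.length := by omega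
    have hmlt : m < w.length := by omega
    simp only [List.range_succ, List.map_append, List.foldl_append]
    rw [ih hm']
    have htake : w.take (m+1) = w.take m ++ [w[m]] := by
      rw [List.take_add_one]
      simp [List.getElem?_eq_getElem hmlt]
    have htw : ∀ c ∈ w.take m, c ≠ ' ' := fun c hc => hw c (List.mem_of_mem_take hc)
    have hcm : w[m] ≠ ' ' := hw _ (w.getElem_mem hmlt)
    rw [htake, canon_word _ htw]
    have hlen : (w.take m).length = m := by simp [hm']
    have hget : (PySem.List.pyGet? w ((m:Nat) : Int)).getD ' ' = w[m] := by
      rw [PySem.List.pyGet?_natCast, List.getElem?_eq_getElem hmlt]; rfl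
    simp only [List.map_cons, List.map_nil, List.foldl_cons, List.foldl_nil, hget,
      canon, if_neg hcm, hlen, zero_add]
    by_cases h2 : (2:Int) ∣ (m:Int) <;> simp [h2]

theorem pvAltWord_eq (w : List Char) (hw : ∀ c ∈ w, c ≠ ' ') : pvAltWord w = canon w 0 := by
  unfold pvAltWord
  rw [pyRange_zero_eq, pvAltWord_take w hw w.length le_rfl, List.take_length]

-- ---------- split₀ on the run decomposition ----------
theorem split_go_nil (cur : List Char) (acc : List (List Char)) :
    PySem.Chars.split₀.go [] cur acc =
      if cur.isEmpty then acc.reverse else (cur.reverse :: acc).reverse := by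
  rw [PySem.Chars.split₀.go]

theorem split_go_cons (c : Char) (rest cur : List Char) (acc : List (List Char)) :
    PySem.Chars.split₀.go (c :: rest) cur acc =
      if PySem.Chars.isspace c then
        (if cur.isEmpty then PySem.Chars.split₀.go rest [] acc
         else PySem.Chars.split₀.go rest [] (cur.reverse :: acc))
      else PySem.Chars.split₀.go rest (c :: cur) acc := by
  rw [PySem.Chars.split₀.go]

theorem split_go_word : ∀ (w : List Char), (∀ c ∈ w, PySem.Chars.isspace c = false) →
    ∀ (t cur : List Char) (acc : List (List Char)),
    PySem.Chars.split₀.go (w ++ t) cur acc = PySem.Chars.split₀.go t (w.reverse ++ cur) acc := by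
  intro w
  induction w with
  | nil => intro _ t cur acc; simp
  | cons c u ih =>
    intro h t cur acc
    have hc : PySem.Chars.isspace c = false := h c (by simp)
    have hu : ∀ x ∈ u, PySem.Chars.isspace x = false := fun x hx => h x (by simp [hx])
    rw [List.cons_append, split_go_cons, if_neg (by simp [hc]), ih hu]
    simp

theorem split_go_rep : ∀ (k : Nat) (t : List Char) (acc : List (List Char)),
    PySem.Chars.split₀.go (rep k ++ t) [] acc = PySem.Chars.split₀.go t [] acc := by
  intro k
  induction k with
  | zero => intro t acc; simp [rep]
  | succ n ih =>
    intro t acc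
    have hr : rep (n+1) = ' ' :: rep n := by simp [rep, List.replicate_succ]
    rw [hr, List.cons_append, split_go_cons, if_pos (by decide), if_pos (by decide)]
    exact ih t acc

theorem split_go_rep_end : ∀ (k : Nat) (cur : List Char) (acc : List (List Char)),
    cur ≠ [] → PySem.Chars.split₀.go (rep k) cur acc = acc.reverse ++ [cur.reverse] := by
  intro k cur acc hcur
  have hne : cur.isEmpty = false := by simpa [List.isEmpty_iff] using hcur
  cases k with
  | zero =>
    rw [rep, List.replicate_zero, split_go_nil, if_neg (by simp [hne])]
    simp
  | succ n =>
    have hr : rep (n+1) = ' ' :: (rep n ++ []) := by simp [rep, List.replicate_succ]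
    rw [hr, split_go_cons, if_pos (by decide), if_neg (by simpa using hcur), split_go_rep,
      split_go_nil]
    simp

theorem split_flat : ∀ rs, good rs → ∀ acc,
    PySem.Chars.split₀.go (flat rs) [] acc = acc.reverse ++ rs.map (·.1) := by
  intro rs
  induction rs with
  | nil => intro _ acc; simp [flat, split_go_nil]
  | cons p rest ih =>
    obtain ⟨w, k⟩ := p
    intro hg acc
    obtain ⟨hw, hns, hrk, hrest⟩ := hg
    have hflat : flat ((w, k) :: rest) = w ++ (rep k ++ flat rest) := by simp [flat]
    have hcur : (w.reverse ++ ([] : List Char)) ≠ [] := by simpa using hw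
    rw [hflat, split_go_word w hns]
    rcases hrk with h0 | h1
    · subst h0
      have hfr : flat ([] : List (List Char × Nat)) = [] := by simp [flat]
      rw [hfr, List.append_nil, split_go_rep_end k _ acc hcur]
      simp
    · obtain ⟨n, rfl⟩ : ∃ n, k = n + 1 := ⟨k - 1, by omega⟩
      have hr : rep (n+1) ++ flat rest = ' ' :: (rep n ++ flat rest) := by
        simp [rep, List.replicate_succ]
      have hne : (w.reverse ++ ([] : List Char)).isEmpty = false := by
        simpa [List.isEmpty_iff] using hw
      rw [hr, split_go_cons, if_pos (by decide), if_neg (by simpa using hw), split_go_rep,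
        ih hrest]
      simp

theorem split_full (k0 : Nat) (rs : List (List Char × Nat)) (hg : good rs) :
    PySem.Chars.split₀ (rep k0 ++ flat rs) = rs.map (·.1) := by
  show PySem.Chars.split₀.go (rep k0 ++ flat rs) [] [] = _
  rw [split_go_rep, split_flat rs hg]
  simp

-- ---------- the blank-counting loop ----------
theorem getD_set_self (l : List Int) (i : Nat) (a : Int) (h : i < l.length) :
    (l.set i a).getD i 0 = a := by
  simp [List.getD_eq_getElem?_getD, h]

theorem getD_set_ne (l : List Int) (i j : Nat) (a : Int) (h : i ≠ j) :
    (l.set i a).getD j 0 = l.getD j 0 := by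
  simp [List.getD_eq_getElem?_getD, List.getElem?_set_ne, h]

theorem fold_rep (k : Nat) : ∀ (b : List Int) (i : Nat),
    (rep k).foldl pvF (b, i) = (b.set i (b.getD i 0 + k), i) := by
  induction k with
  | zero =>
    intro b i
    rcases Nat.lt_or_ge i b.length with h | h
    · have hgd : b.getD i 0 = b[i] := by
        simp [List.getD_eq_getElem?_getD, List.getElem?_eq_getElem h]
      simp only [rep, List.replicate_zero, List.foldl_nil, Nat.cast_zero, add_zero, hgd,
        List.set_getElem_self]
    · simp [rep, List.set_eq_of_length_le h]
  | succ n ih =>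
    intro b i
    have hr : rep (n+1) = ' ' :: rep n := by simp [rep, List.replicate_succ]
    rw [hr, List.foldl_cons]
    show (rep n).foldl pvF (pvF (b, i) ' ') = _
    rw [show pvF (b, i) ' ' = (b.set i (b.getD i 0 + 1), i) from by simp [pvF]]
    rw [ih]
    rcases Nat.lt_or_ge i b.length with h | h
    · rw [getD_set_self b i _ h, List.set_set]
      congr 1
      push_cast
      ring
    · rw [List.set_eq_of_length_le h, List.set_eq_of_length_le h, List.set_eq_of_length_le h]

theorem fold_word0 : ∀ (w : List Char), (∀ c ∈ w, c ≠ ' ') → ∀ (b : List Int) (i : Nat),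
    b.getD i 0 = 0 → w.foldl pvF (b, i) = (b, i) := by
  intro w
  induction w with
  | nil => intro _ b i _; simp
  | cons c u ih =>
    intro h b i hz
    have hc : c ≠ ' ' := h c (by simp)
    have hu : ∀ x ∈ u, x ≠ ' ' := fun x hx => h x (by simp [hx])
    rw [List.foldl_cons]
    rw [show pvF (b, i) c = (b, i) from by
      simp only [pvF, if_neg hc, hz]
      norm_num]
    exact ih hu b i hz

theorem render_acc (b : List Int) : ∀ (ws : List (List Char)) (a : List Char) (i : Nat),
    (ws.foldl (fun (st : List Char × Nat) word =>
      (st.1 ++ pvAltWord word ++ List.replicate ((b.getD st.2 0).toNat) ' ', st.2 + 1)) (a, i)).1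
    = a ++ renderF b ws i := by
  intro ws
  induction ws with
  | nil => intro a i; simp [renderF]
  | cons w ws ih =>
    intro a i
    simp only [List.foldl_cons]
    rw [ih]
    simp [renderF]

theorem fold_flat : ∀ rs, good rs → ∀ (b : List Int) (i : Nat),
    (∀ j, i < j → b.getD j 0 = 0) → (∀ j, 0 ≤ b.getD j 0) → i + rs.length < b.length →
    (renderF ((flat rs).foldl pvF (b, i)).1 (rs.map (·.1)) (if 0 < b.getD i 0 then i + 1 else i)
        = rs.flatMap (fun p => canon p.1 0 ++ rep p.2))
    ∧ (0 < b.getD i 0 → ∀ j, j ≤ i → (((flat rs).foldl pvF (b, i)).1).getD j 0 = b.getD j 0)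
    ∧ (((flat rs).foldl pvF (b, i)).1).length = b.length := by
  intro rs
  induction rs with
  | nil =>
    intro _ b i _ _ _
    refine ⟨?_, fun _ j _ => rfl, rfl⟩
    simp [flat, renderF]
  | cons p rest ih =>
    obtain ⟨w, k⟩ := p
    intro hg b i hz hnn hlen
    obtain ⟨hw, hns, hrk, hrest⟩ := hg
    have hw' : ∀ c ∈ w, c ≠ ' ' := fun c hc => ne_space_of_isspace_false (hns c hc)
    have hib : i < b.length := by simp at hlen; omega
    have hflat : flat ((w, k) :: rest) = w ++ (rep k ++ flat rest) := by simp [flat]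
    have hwordfold : w.foldl pvF (b, i) = (b, if 0 < b.getD i 0 then i + 1 else i) := by
      by_cases hpos : 0 < b.getD i 0
      · obtain ⟨c, u, rfl⟩ := List.exists_cons_of_ne_nil hw
        rw [List.foldl_cons]
        rw [show pvF (b, i) c = (b, i + 1) from by
          simp only [pvF, if_neg (hw' c (by simp))]
          rw [if_pos hpos]]
        rw [fold_word0 u (fun x hx => hw' x (by simp [hx])) b (i+1) (hz (i+1) (by omega))]
        rw [if_pos hpos]
      · have hz0 : b.getD i 0 = 0 := le_antisymm (not_lt.mp hpos) (hnn i)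
        rw [fold_word0 w hw' b i hz0, if_neg hpos]
    have hii' : (if 0 < b.getD i 0 then i + 1 else i) ≤ i + 1 := by split <;> omega
    have hii'' : i ≤ (if 0 < b.getD i 0 then i + 1 else i) := by split <;> omega
    have hzi' : b.getD (if 0 < b.getD i 0 then i + 1 else i) 0 = 0 := by
      by_cases hpos : 0 < b.getD i 0
      · rw [if_pos hpos]; exact hz (i+1) (by omega)
      · rw [if_neg hpos]; exact le_antisymm (not_lt.mp hpos) (hnn i)
    have hspacefold :
        (rep k).foldl pvF (b, (if 0 < b.getD i 0 then i + 1 else i))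
          = (b.set (if 0 < b.getD i 0 then i + 1 else i) ((k : Int)),
             (if 0 < b.getD i 0 then i + 1 else i)) := by
      rw [fold_rep, hzi', zero_add]
    have hi'b : (if 0 < b.getD i 0 then i + 1 else i) < b.length := by
      simp at hlen; split <;> omega
    have hgd : (b.set (if 0 < b.getD i 0 then i + 1 else i) ((k : Int))).getD
        (if 0 < b.getD i 0 then i + 1 else i) 0 = (k : Int) :=
      getD_set_self _ _ _ (by omega)
    have hz' : ∀ j, (if 0 < b.getD i 0 then i + 1 else i) < j →
        (b.set (if 0 < b.getD i 0 then i + 1 else i) ((k : Int))).getD j 0 = 0 := by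
      intro j hj
      rw [getD_set_ne _ _ j _ (by omega)]
      exact hz j (by omega)
    have hnn' : ∀ j, 0 ≤ (b.set (if 0 < b.getD i 0 then i + 1 else i) ((k : Int))).getD j 0 := by
      intro j
      by_cases hje : (if 0 < b.getD i 0 then i + 1 else i) = j
      · subst hje; rw [hgd]; positivity
      · rw [getD_set_ne _ _ j _ hje]; exact hnn j
    have hfold : (flat ((w, k) :: rest)).foldl pvF (b, i)
        = (flat rest).foldl pvF
            (b.set (if 0 < b.getD i 0 then i + 1 else i) ((k : Int)),
             (if 0 < b.getD i 0 then i + 1 else i)) := by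
      rw [hflat, List.foldl_append, hwordfold, List.foldl_append, hspacefold]
    obtain ⟨hrender, hframe, hlenf⟩ :=
      ih hrest (b.set (if 0 < b.getD i 0 then i + 1 else i) ((k : Int)))
        (if 0 < b.getD i 0 then i + 1 else i) hz' hnn'
        (by simp at hlen ⊢; split <;> omega)
    refine ⟨?_, ?_, by rw [hfold, hlenf]; simp⟩
    · rw [hfold]
      simp only [List.map_cons, renderF, List.flatMap_cons]
      have hfinal_i' : (((flat rest).foldl pvF
          (b.set (if 0 < b.getD i 0 then i + 1 else i) ((k : Int)),
           (if 0 < b.getD i 0 then i + 1 else i))).1).getD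
          (if 0 < b.getD i 0 then i + 1 else i) 0 = (k : Int) := by
        rcases hrk with h0 | h1
        · subst h0
          simp only [flat, List.flatMap_nil, List.foldl_nil]
          exact hgd
        · rw [hframe (by rw [hgd]; exact_mod_cast h1) _ le_rfl, hgd]
      rw [hfinal_i', pvAltWord_eq w hw']
      have hbump : (if 0 < (b.set (if 0 < b.getD i 0 then i + 1 else i) ((k : Int))).getD
            (if 0 < b.getD i 0 then i + 1 else i) 0
          then (if 0 < b.getD i 0 then i + 1 else i) + 1
          else (if 0 < b.getD i 0 then i + 1 else i))
          = (if 0 < (k:Int) then (if 0 < b.getD i 0 then i + 1 else i) + 1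
             else (if 0 < b.getD i 0 then i + 1 else i)) := by rw [hgd]
      have hrender' : renderF (((flat rest).foldl pvF
          (b.set (if 0 < b.getD i 0 then i + 1 else i) ((k : Int)),
           (if 0 < b.getD i 0 then i + 1 else i))).1) (rest.map (·.1))
          ((if 0 < b.getD i 0 then i + 1 else i) + 1)
          = rest.flatMap (fun p => canon p.1 0 ++ rep p.2) := by
        rcases hrk with h0 | h1
        · subst h0; simp [renderF]
        · have hkpos : (0:Int) < (k:Int) := by exact_mod_cast h1
          rw [← show (if 0 < (b.set (if 0 < b.getD i 0 then i + 1 else i) ((k : Int))).getD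
                (if 0 < b.getD i 0 then i + 1 else i) 0
              then (if 0 < b.getD i 0 then i + 1 else i) + 1
              else (if 0 < b.getD i 0 then i + 1 else i))
              = (if 0 < b.getD i 0 then i + 1 else i) + 1 from by rw [hgd, if_pos hkpos]]
          exact hrender
      rw [hrender']
      simp [rep]
    · intro hpos j hj
      rw [hfold]
      have hjb : (b.set (if 0 < b.getD i 0 then i + 1 else i) ((k : Int))).getD j 0
          = b.getD j 0 := by
        rw [getD_set_ne _ _ j _ (by split <;> omega)]
      rcases hrk with h0 | h1
      · subst h0
        simpa [flat] using hjb
      · rw [hframe (by rw [hgd]; exact_mod_cast h1) j (by omega), hjb]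

-- ---------- characters in the admitted domain ----------
theorem char_eq_of_toNat {a b : Char} (h : a.toNat = b.toNat) : a = b := by
  apply Char.ext; unfold Char.toNat at h; exact UInt32.toNat_inj.mp h

theorem isspace_iff_of_dom {c : Char} (hd : pvDomChar c = true)
    (ht : (c == '\t' || c == '\n' || c == '\r') = false) :
    (PySem.Chars.isspace c = true ↔ c = ' ') := by
  constructor
  · intro hs
    have ht9 : c.toNat ≠ 9 := fun h => by
      rw [char_eq_of_toNat (show c.toNat = '\t'.toNat from h)] at ht; simp at ht
    have ht10 : c.toNat ≠ 10 := fun h => by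
      rw [char_eq_of_toNat (show c.toNat = '\n'.toNat from h)] at ht; simp at ht
    have ht13 : c.toNat ≠ 13 := fun h => by
      rw [char_eq_of_toNat (show c.toNat = '\r'.toNat from h)] at ht; simp at ht
    have h32 : c.toNat = 32 := by
      have hd2 := hd
      have hs2 := hs
      simp only [pvDomChar, Bool.or_eq_true, Bool.and_eq_true, decide_eq_true_eq,
        beq_iff_eq] at hd2
      simp only [PySem.Chars.isspace, Bool.or_eq_true, Bool.and_eq_true,
        decide_eq_true_eq] at hs2
      omega
    exact char_eq_of_toNat (show c.toNat = ' '.toNat from h32)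
  · intro h; subst h; decide

-- ---------- existence of the run decomposition ----------
theorem dropWhile_head_false {p : Char → Bool} :
    ∀ (l : List Char) (c : Char) (r' : List Char), l.dropWhile p = c :: r' → p c = false := by
  intro l
  induction l with
  | nil => intro c r' h; simp at h
  | cons a t ih =>
    intro c r' h
    rw [List.dropWhile_cons] at h
    by_cases hpa : p a
    · rw [if_pos hpa] at h
      exact ih c r' h
    · rw [if_neg hpa] at h
      cases h
      simpa using hpa

theorem parse_exists_aux : ∀ (n : Nat) (cs : List Char), cs.length ≤ n → ok cs →
    ∃ k0 rs, cs = rep k0 ++ flat rs ∧ good rs := by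
  intro n
  induction n with
  | zero =>
    intro cs hn _
    have : cs = [] := List.eq_nil_of_length_eq_zero (by omega)
    exact ⟨0, [], by simp [this, rep, flat], trivial⟩
  | succ m ih =>
    intro cs hn hok
    have hcs : cs = cs.takeWhile (· == ' ') ++ cs.dropWhile (· == ' ') :=
      (List.takeWhile_append_dropWhile).symm
    have htake : cs.takeWhile (· == ' ') = rep ((cs.takeWhile (· == ' ')).length) := by
      rw [rep]
      apply List.eq_replicate_of_mem
      intro c hc
      simpa using List.mem_takeWhile_imp hc
    cases hrr : cs.dropWhile (· == ' ') with
    | nil =>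
      refine ⟨(cs.takeWhile (· == ' ')).length, [], ?_, trivial⟩
      conv_lhs => rw [hcs]
      rw [hrr, htake]
      simp [flat, rep]
    | cons c r' =>
      have hcne : c ≠ ' ' := by
        simpa using dropWhile_head_false cs c r' hrr
      have hrw : c :: r' = (c :: r').takeWhile (fun x => !(x == ' '))
          ++ (c :: r').dropWhile (fun x => !(x == ' ')) :=
        (List.takeWhile_append_dropWhile).symm
      have hwne : (c :: r').takeWhile (fun x => !(x == ' ')) ≠ [] := by
        simp [hcne]
      have hmemr : ∀ x ∈ (c :: r'), x ∈ cs := by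
        intro x hx
        rw [hcs, hrr]
        exact List.mem_append_right _ hx
      have hwns : ∀ x ∈ (c :: r').takeWhile (fun x => !(x == ' ')),
          PySem.Chars.isspace x = false := by
        intro x hx
        have hxr : x ∈ (c :: r') := (List.takeWhile_sublist _).subset hx
        have hxne : x ≠ ' ' := by simpa using List.mem_takeWhile_imp hx
        have := hok x (hmemr x hxr)
        by_contra hcon
        rw [Bool.not_eq_false] at hcon
        exact hxne (this.mp hcon)
      have hthead : ∀ (c1 : Char) (u : List Char),
          (c :: r').dropWhile (fun x => !(x == ' ')) = c1 :: u → c1 = ' ' := by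
        intro c1 u h
        have := dropWhile_head_false (c :: r') c1 u h
        simpa using this
      have htlen : ((c :: r').dropWhile (fun x => !(x == ' '))).length ≤ m := by
        have h1 : ((c :: r').takeWhile (fun x => !(x == ' '))).length
            + ((c :: r').dropWhile (fun x => !(x == ' '))).length = (c :: r').length := by
          have := congrArg List.length hrw
          simp only [List.length_append] at this
          omega
        have h2 : (c :: r').length ≤ cs.length := by
          conv_rhs => rw [hcs, hrr]
          simp
        have h3 : 1 ≤ ((c :: r').takeWhile (fun x => !(x == ' '))).length := by
          cases hw : (c :: r').takeWhile (fun x => !(x == ' ')) with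
          | nil => exact absurd hw hwne
          | cons _ _ => simp
        omega
      have htok : ok ((c :: r').dropWhile (fun x => !(x == ' '))) := by
        intro x hx
        exact hok x (hmemr x ((List.dropWhile_sublist _).subset hx))
      obtain ⟨k1, rs1, ht1, hg1⟩ := ih _ htlen htok
      have hk1 : rs1 = [] ∨ 1 ≤ k1 := by
        cases hrs1 : rs1 with
        | nil => exact Or.inl rfl
        | cons q qs =>
          right
          obtain ⟨w1, k2⟩ := q
          have hg1' := hg1
          rw [hrs1] at hg1'
          obtain ⟨hw1, hns1, _, _⟩ := hg1'
          by_contra hcon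
          have hk10 : k1 = 0 := by omega
          obtain ⟨c1, u1, hwc⟩ := List.exists_cons_of_ne_nil hw1
          have htflat : (c :: r').dropWhile (fun x => !(x == ' '))
              = c1 :: (u1 ++ (rep k2 ++ flat qs)) := by
            rw [ht1, hrs1, hk10, hwc]
            simp [rep, flat]
          have hc1 : c1 = ' ' := hthead c1 _ htflat
          have := hns1 c1 (by simp [hwc])
          rw [hc1] at this
          exact absurd this (by decide)
      refine ⟨(cs.takeWhile (· == ' ')).length,
        ((c :: r').takeWhile (fun x => !(x == ' ')), k1) :: rs1, ?_, ?_⟩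
      · conv_lhs => rw [hcs, hrr]
        rw [htake]
        conv_lhs => rw [hrw]
        rw [ht1]
        simp [flat, rep]
      · exact ⟨hwne, hwns, hk1, hg1⟩

theorem parse_exists (cs : List Char) (hok : ok cs) :
    ∃ k0 rs, cs = rep k0 ++ flat rs ∧ good rs :=
  parse_exists_aux cs.length cs le_rfl hok

-- ---------- main ----------
theorem replicate_getD_zero (n i : Nat) : (List.replicate n (0:Int)).getD i 0 = 0 := by
  simp [List.getD_eq_getElem?_getD, List.getElem?_replicate]
  split <;> rfl

theorem coreA_eq (cs : List Char) (hok : ok cs) : coreA cs = canon cs 0 := by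
  obtain ⟨k0, rs, rfl, hg⟩ := parse_exists cs hok
  unfold coreA
  rw [split_full k0 rs hg]
  set n := (rs.map (·.1)).length with hn
  have hnn : n = rs.length := by simp [hn]
  set b0 : List Int := List.replicate (n + 1) 0 with hb0
  have hfold1 : (rep k0 ++ flat rs).foldl pvF (b0, 0) = (flat rs).foldl pvF (b0.set 0 (k0 : Int), 0) := by
    rw [List.foldl_append, fold_rep k0 b0 0, replicate_getD_zero, zero_add]
  have hz : ∀ j, 0 < j → (b0.set 0 (k0 : Int)).getD j 0 = 0 := by
    intro j hj
    rw [getD_set_ne b0 0 j _ (by omega), hb0, replicate_getD_zero]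
  have hlen : 0 + rs.length < (b0.set 0 (k0 : Int)).length := by
    simp [hb0, hnn]
  have hgd0 : (b0.set 0 (k0 : Int)).getD 0 0 = (k0 : Int) := by
    apply getD_set_self
    simp [hb0]
  have hnn : ∀ j, 0 ≤ (b0.set 0 (k0 : Int)).getD j 0 := by
    intro j
    by_cases hj : (0:Nat) = j
    · subst hj; rw [hgd0]; positivity
    · rw [getD_set_ne b0 0 j _ hj, hb0, replicate_getD_zero]
  obtain ⟨hrender, hframe, _⟩ := fold_flat rs hg (b0.set 0 (k0 : Int)) 0 hz hnn hlen
  rcases Nat.eq_zero_or_pos k0 with hk0 | hk0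
  · -- no leading spaces
    subst hk0
    have hhead : ¬ ((rep 0 ++ flat rs).headD 'x' = ' ') := by
      cases hrs : rs with
      | nil => subst hrs; decide
      | cons q qs =>
        obtain ⟨w, k⟩ := q
        have hg' := hg; rw [hrs] at hg'
        obtain ⟨hw, hns, _, _⟩ := hg'
        obtain ⟨c1, u1, rfl⟩ : ∃ c1 u1, w = c1 :: u1 := by
          cases w with
          | nil => exact absurd rfl hw
          | cons c1 u1 => exact ⟨c1, u1, rfl⟩
        have hc1 : c1 ≠ ' ' := ne_space_of_isspace_false (hns c1 (by simp))
        simp [rep, flat, hc1]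
    rw [if_neg hhead]
    rw [hfold1, render_acc]
    have hif : (if 0 < (b0.set 0 ((0:Nat) : Int)).getD 0 0 then 0 + 1 else 0) = 0 := by
      rw [hgd0]; simp
    rw [hif] at hrender
    rw [hrender, ← canon_flat rs hg]
    simp [rep]
  · -- leading spaces
    have hhead : (rep k0 ++ flat rs).headD 'x' = ' ' := by
      obtain ⟨p, rfl⟩ : ∃ p, k0 = p + 1 := ⟨k0 - 1, by omega⟩
      simp [rep, List.replicate_succ]
    rw [if_pos hhead]
    rw [hfold1, render_acc]
    have hposk : (0:Int) < (k0 : Int) := by exact_mod_cast hk0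
    have hfgd0 : (((flat rs).foldl pvF (b0.set 0 (k0 : Int), 0)).1).getD 0 0 = (k0 : Int) := by
      rw [hframe (by rw [hgd0]; exact hposk) 0 le_rfl, hgd0]
    rw [hfgd0]
    have hif : (if 0 < (b0.set 0 ((k0:Nat) : Int)).getD 0 0 then 0 + 1 else 0) = 0 + 1 := by
      rw [hgd0, if_pos hposk]
    rw [hif] at hrender
    rw [hrender, ← canon_flat rs hg, canon_rep_pos k0 hk0]
    simp [rep]

-- ===== VERDICT (by name: the statement is the Claim_ definition above) =====
theorem solution_spec : Claim_equal_solution := by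
  intro s hdom hpre
  unfold Spec_solution
  have hok : ok s.toList := by
    intro c hc
    have hd : pvDomChar c = true := by
      have h := hdom
      unfold Dom_solution pvDomStr at h
      exact List.all_eq_true.mp h c hc
    have ht : (c == '\t' || c == '\n' || c == '\r') = false := by
      have h := List.all_eq_true.mp hpre.2 c hc
      simpa using h
    exact isspace_iff_of_dom hd ht
  rw [solution_eq_coreA, coreA_eq s.toList hok, alt_eq_canon]
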